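-- pv_equiv track=rewrite | github.com/RaTaiHok/Rotaeno_leaderboard_web | untils/save_untils/xp_calc.py | xp_calc
-- ===== SOURCE A (Python) =====
-- def find_interval_index(value, intervals):
--     for i, interval in enumerate(intervals):
--         if value < interval:
--             return i
--     return len(intervals)
--
-- def xp_calc(value):
--     prefix_sum = [100, 220, 360, 520, 700, 900, 1120, 1360, 1660, 1870, 2090, 2320, 2560, 2810, 3070, 3340, 3620, 3910, 4210, 4460, 4720, 4990, 5270, 5560, 5860, 6170, 6490, 6820, 7160, 7510, 7870, 8240, 8620, 9010, 9410, 9820, 10240, 10670, 11110, 11560, 12020, 12490, 12970, 13460, 13960, 14470, 14990]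
--     intervals = [prefix_sum[i] for i in range(len(prefix_sum))]
--     level = find_interval_index(value, intervals)
--
--     if level != len(intervals):
--         lower_limit = intervals[level - 1] if level > 0 else 0
--         upper_limit = intervals[level]
--         return level, value - lower_limit, upper_limit - lower_limit
--     else:
--         xp_difv = value - prefix_sum[-1]
--         level = len(prefix_sum) + (xp_difv // 500) + 1
--         up_xp = prefix_sum[-1] + ((xp_difv // 500) * 500)
--         calc_difv = value - up_xp
--         return level, calc_difv, 500
-- ===== SOURCE B (Python) =====
-- def xp_calc(value):
--     prefix_sum = [100, 220, 360, 520, 700, 900, 1120, 1360, 1660, 1870, 2090, 2320, 2560, 2810, 3070, 3340, 3620, 3910, 4210, 4460, 4720, 4990, 5270, 5560, 5860, 6170, 6490, 6820, 7160, 7510, 7870, 8240, 8620, 9010, 9410, 9820, 10240, 10670, 11110, 11560, 12020, 12490, 12970, 13460, 13960, 14470, 14990]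
--     # binary search for the first index with value < prefix_sum[index]
--     lo, hi = 0, len(prefix_sum)
--     while lo < hi:
--         mid = (lo + hi) // 2
--         if value < prefix_sum[mid]:
--             hi = mid
--         else:
--             lo = mid + 1
--     level = lo
--     if level != len(prefix_sum):
--         lower = prefix_sum[level - 1] if level > 0 else 0
--         return level, value - lower, prefix_sum[level] - lower
--     q, r = divmod(value - prefix_sum[-1], 500)
--     return len(prefix_sum) + q + 1, r, 500
-- ===== Notes on version B (the rewrite author's own statement) =====
-- stated objective: alternative
-- what changed: Replaces the linear scan over the level-threshold table with a hand-rolled binary search (and computes the overflow branch with a single divmod), dropping the redundant intervals copy.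
import Mathlib
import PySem

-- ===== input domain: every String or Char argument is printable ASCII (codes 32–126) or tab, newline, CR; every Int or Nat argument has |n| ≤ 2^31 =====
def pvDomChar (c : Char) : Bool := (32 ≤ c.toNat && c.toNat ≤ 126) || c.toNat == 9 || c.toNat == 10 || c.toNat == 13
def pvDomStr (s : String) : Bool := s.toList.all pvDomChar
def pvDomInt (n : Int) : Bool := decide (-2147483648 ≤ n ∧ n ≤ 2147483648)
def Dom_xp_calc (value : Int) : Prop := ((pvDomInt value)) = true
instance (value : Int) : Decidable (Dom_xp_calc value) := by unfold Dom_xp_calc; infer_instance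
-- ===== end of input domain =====

-- B replaces A's linear scan over the 47 thresholds by a hand-rolled binary search and
-- computes the overflow branch with divmod; same return value everywhere (alternative/idiomatic).

-- ===== PORT A =====
def pvPrefixSum : List Int := [100, 220, 360, 520, 700, 900, 1120, 1360, 1660, 1870, 2090, 2320, 2560, 2810, 3070, 3340, 3620, 3910, 4210, 4460, 4720, 4990, 5270, 5560, 5860, 6170, 6490, 6820, 7160, 7510, 7870, 8240, 8620, 9010, 9410, 9820, 10240, 10670, 11110, 11560, 12020, 12490, 12970, 13460, 13960, 14470, 14990]

-- 'for i, interval in enumerate(intervals): if value < interval: return i' / 'return len(intervals)',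
-- folded as structural recursion carrying the running index i
def find_interval_index_aux (value : Int) (l : List Int) (i : Int) : Int :=
  match l with
  | [] => i
  | x :: xs => if value < x then i else find_interval_index_aux value xs (i + 1)

def find_interval_index (value : Int) (intervals : List Int) : Int :=
  find_interval_index_aux value intervals 0

def xp_calc (value : Int) : Int × Int × Int :=
  let prefix_sum := pvPrefixSum
  -- intervals = [prefix_sum[i] for i in range(len(prefix_sum))]  (indices all in range, getD never defaults)
  let intervals := (List.range prefix_sum.length).map (fun i => prefix_sum.getD i 0)
  let level := find_interval_index value intervals
  if level ≠ (intervals.length : Int) then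
    let lower_limit := if level > 0 then (PySem.List.pyGet? intervals (level - 1)).getD 0 else 0
    let upper_limit := (PySem.List.pyGet? intervals level).getD 0
    (level, value - lower_limit, upper_limit - lower_limit)
  else
    let last := (PySem.List.pyGet? prefix_sum (-1)).getD 0
    let xp_difv := value - last
    let q := PySem.Int.floordiv xp_difv 500
    let level' := (prefix_sum.length : Int) + q + 1
    let up_xp := last + q * 500
    (level', value - up_xp, 500)

-- ===== PORT B =====
-- the while-loop 'lo, hi = ...; while lo < hi: ...' of Source B, as recursion on hi - lo
def pvBisect (value : Int) (a : List Int) (lo hi : Nat) : Nat :=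
  if _h : lo < hi then
    let mid := (lo + hi) / 2
    if value < a.getD mid 0 then pvBisect value a lo mid
    else pvBisect value a (mid + 1) hi
  else lo
termination_by hi - lo
decreasing_by all_goals omega

def xp_calc_alt (value : Int) : Int × Int × Int :=
  let prefix_sum := pvPrefixSum
  let level : Int := (pvBisect value prefix_sum 0 prefix_sum.length : Nat)
  if level ≠ (prefix_sum.length : Int) then
    let lower := if level > 0 then (PySem.List.pyGet? prefix_sum (level - 1)).getD 0 else 0
    (level, value - lower, (PySem.List.pyGet? prefix_sum level).getD 0 - lower)
  else
    let qr := (PySem.Int.divmod? (value - (PySem.List.pyGet? prefix_sum (-1)).getD 0) 500).getD (0, 0)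
    ((prefix_sum.length : Int) + qr.1 + 1, qr.2, 500)

-- ===== PRECONDITION & SPEC =====
def Spec_xp_calc (value : Int) (out : Int × Int × Int) : Prop := out = xp_calc_alt value
instance (value : Int) (out : Int × Int × Int) : Decidable (Spec_xp_calc value out) := by unfold Spec_xp_calc; infer_instance

-- ===== CLAIM (what is proved, stated in full; the proofs are below) =====
def Claim_equal_xp_calc : Prop := ∀ (value : Int), Dom_xp_calc value → Spec_xp_calc value (xp_calc value)

-- ===== LEMMAS AND PROOFS =====

theorem map_range_getD (l : List Int) :
    (List.range l.length).map (fun i => l.getD i 0) = l := by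
  apply List.ext_getElem
  · simp
  · intro i h1 h2
    simp [List.getElem?_eq_getElem h2]

theorem lin_eq_takeWhile (v : Int) (l : List Int) (i : Int) :
    find_interval_index_aux v l i
      = i + ((l.takeWhile (fun x => !decide (v < x))).length : Int) := by
  induction l generalizing i with
  | nil => simp [find_interval_index_aux]
  | cons x xs ih =>
    by_cases h : v < x
    · simp [find_interval_index_aux, List.takeWhile, h]
    · simp [find_interval_index_aux, List.takeWhile, h, ih (i + 1)]
      omega

theorem tw_le (p : Int → Bool) (l : List Int) : (l.takeWhile p).length ≤ l.length := by
  induction l with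
  | nil => simp
  | cons x xs ih =>
    by_cases h : p x <;> simp [List.takeWhile, h] <;> omega

theorem tw_pred (p : Int → Bool) (l : List Int) (j : Nat)
    (h : j < (l.takeWhile p).length) : p (l.getD j 0) = true := by
  induction l generalizing j with
  | nil => simp at h
  | cons x xs ih =>
    by_cases hp : p x
    · cases j with
      | zero => simpa [hp]
      | succ j =>
        simp only [List.takeWhile, hp, List.length_cons] at h
        simpa using ih j (by simpa using h)
    · simp [List.takeWhile, hp] at h

theorem tw_stop (p : Int → Bool) (l : List Int)
    (h : (l.takeWhile p).length < l.length) :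
    p (l.getD (l.takeWhile p).length 0) = false := by
  induction l with
  | nil => simp at h
  | cons x xs ih =>
    by_cases hp : p x
    · simp only [List.takeWhile, hp, List.length_cons] at h ⊢
      simpa using ih (by omega)
    · simp [List.takeWhile, hp]

theorem bisect_eq_of (v : Int) (a : List Int) (k : Nat)
    (hk : ∀ j, j < a.length → (j < k ↔ ¬ v < a.getD j 0)) :
    ∀ n lo hi, hi - lo ≤ n → lo ≤ k → k ≤ hi → hi ≤ a.length →
      pvBisect v a lo hi = k := by
  intro n
  induction n with
  | zero =>
    intro lo hi hn hlo hhi hlen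
    have h : ¬ lo < hi := by omega
    unfold pvBisect
    simp [h]; omega
  | succ n ih =>
    intro lo hi hn hlo hhi hlen
    by_cases hlt : lo < hi
    · unfold pvBisect
      simp only [hlt, dif_pos]
      by_cases hc : v < a.getD ((lo + hi) / 2) 0
      · simp only [hc, if_pos]
        have hkmid : k ≤ (lo + hi) / 2 := by
          by_contra hcon
          exact ((hk ((lo + hi) / 2) (by omega)).mp (by omega)) hc
        exact ih lo ((lo + hi) / 2) (by omega) hlo hkmid (by omega)
      · simp only [hc, if_neg, if_false]
        have hkmid : (lo + hi) / 2 < k := (hk ((lo + hi) / 2) (by omega)).mpr hc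
        exact ih ((lo + hi) / 2 + 1) hi (by omega) (by omega) hhi hlen
    · unfold pvBisect
      simp [hlt]; omega

theorem index_eq (v : Int) :
    ((pvBisect v pvPrefixSum 0 pvPrefixSum.length : Nat) : Int)
      = find_interval_index v pvPrefixSum := by
  set p := (fun x : Int => !decide (v < x)) with hp
  set k := (pvPrefixSum.takeWhile p).length with hkdef
  have hle : k ≤ pvPrefixSum.length := tw_le p pvPrefixSum
  have hsorted : pvPrefixSum.Pairwise (· ≤ ·) := by decide
  have hk : ∀ j, j < pvPrefixSum.length → (j < k ↔ ¬ v < pvPrefixSum.getD j 0) := by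
    intro j hj
    constructor
    · intro hjk
      have h1 := tw_pred p pvPrefixSum j hjk
      simp only [hp, Bool.not_eq_true', decide_eq_false_iff_not] at h1
      exact h1
    · intro hv
      by_contra hcon
      have hklt : k < pvPrefixSum.length := by omega
      have hstop := tw_stop p pvPrefixSum hklt
      simp only [hp, Bool.not_eq_false', decide_eq_true_eq] at hstop
      rw [← hp, ← hkdef] at hstop
      have hmono : pvPrefixSum.getD k 0 ≤ pvPrefixSum.getD j 0 := by
        rcases Nat.lt_or_ge k j with h | h
        · rw [List.getD_eq_getElem _ 0 hklt, List.getD_eq_getElem _ 0 hj]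
          exact (List.pairwise_iff_getElem.mp hsorted) k j hklt hj h
        · have : k = j := by omega
          rw [this]
      omega
  have hb := bisect_eq_of v pvPrefixSum k hk pvPrefixSum.length 0 pvPrefixSum.length
    (by omega) (by omega) hle (le_refl _)
  rw [hb, find_interval_index, lin_eq_takeWhile, hkdef, hp]
  omega


-- ===== VERDICT (by name: the statement is the Claim_ definition above) =====
theorem xp_calc_spec : Claim_equal_xp_calc := by
  intro value _
  show xp_calc value = xp_calc_alt value
  unfold xp_calc xp_calc_alt
  simp only [map_range_getD, ← index_eq]
  split_ifs
  · rfl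
  · rfl
  · have hdm : ∀ a : Int, (PySem.Int.divmod? a 500).getD (0, 0)
        = (PySem.Int.floordiv a 500, PySem.Int.mod a 500) := by
      intro a
      simp [PySem.Int.divmod?, PySem.Int.floordiv, PySem.Int.mod]
    rw [hdm]
    have := PySem.Int.floordiv_mul_add_mod
      (value - (PySem.List.pyGet? pvPrefixSum (-1)).getD 0) 500
    simp only [Prod.mk.injEq]
    refine ⟨trivial, by omega, trivial⟩
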